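-- pv_equiv track=rewrite | github.com/FoxLisk/aoc2020 | day10.py | chop_into_separate_parts
-- ===== SOURCE A (Python) =====
-- def chop_into_separate_parts(adapters):
--     parts = []
--     prev = adapters[0]
--     cur_part = []
--     for a in adapters:
--         if a - prev == 3:
--             parts.append(cur_part)
--             cur_part = []
--         cur_part.append(a)
--         prev = a
--     parts.append(cur_part)
--     return parts
-- ===== SOURCE B (Python) =====
-- def chop_into_separate_parts(adapters):
--     # Recursive decomposition: split off the prefix before the first gap of 3,
--     # then recurse on the remainder.
--     for i in range(1, len(adapters)):
--         if adapters[i] - adapters[i - 1] == 3: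
--             return [adapters[:i]] + chop_into_separate_parts(adapters[i:])
--     return [adapters]
-- ===== Notes on version B (the rewrite author's own statement) =====
-- stated objective: alternative
-- what changed: Replaces A's single accumulator loop (parts/prev/cur_part state) with a recursive decomposition: find the first gap-of-3 boundary, emit the prefix before it, recurse on the rest.
import Mathlib
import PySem

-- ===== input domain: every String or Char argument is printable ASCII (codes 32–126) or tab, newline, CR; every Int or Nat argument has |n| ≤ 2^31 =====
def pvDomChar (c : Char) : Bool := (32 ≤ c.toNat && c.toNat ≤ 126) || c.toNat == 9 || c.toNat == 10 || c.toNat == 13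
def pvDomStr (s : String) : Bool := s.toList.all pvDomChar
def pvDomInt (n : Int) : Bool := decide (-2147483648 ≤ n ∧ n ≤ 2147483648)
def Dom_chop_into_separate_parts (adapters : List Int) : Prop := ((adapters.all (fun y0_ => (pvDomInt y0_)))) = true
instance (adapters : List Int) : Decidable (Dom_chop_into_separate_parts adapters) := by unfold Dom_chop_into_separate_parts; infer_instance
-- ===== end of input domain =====

-- B replaces A's accumulator loop by a recursive split at the first gap of 3 (alternative decomposition, same cost).

-- ===== PORT A =====
-- the for-loop of A with its state (parts, prev, cur_part)
def chopLoopA : List Int → List (List Int) → Int → List Int → List (List Int)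
  | [], parts, _, cur => parts ++ [cur]
  | a :: rest, parts, prev, cur =>
    if a - prev = 3 then chopLoopA rest (parts ++ [cur]) a [a]
    else chopLoopA rest parts a (cur ++ [a])

def chop_into_separate_parts (adapters : List Int) : List (List Int) :=
  match adapters with
  | [] => []                         -- Python raises IndexError at adapters[0]; excluded by Pre_
  | a0 :: _ => chopLoopA adapters [] a0 []

-- ===== PORT B =====
-- the for-loop of B: first index i ≥ k (absolute) with adapters[i] - adapters[i-1] == 3
def firstGapIdx : Int → List Int → Nat → Option Nat
  | _, [], _ => none
  | prev, a :: xs, k => if a - prev = 3 then some k else firstGapIdx a xs (k + 1)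

theorem firstGapIdx_ge {prev : Int} {xs : List Int} {k i : Nat}
    (h : firstGapIdx prev xs k = some i) : k ≤ i := by
  induction xs generalizing prev k with
  | nil => simp [firstGapIdx] at h
  | cons a t ih =>
    simp only [firstGapIdx] at h
    split at h
    · cases h; omega
    · have := ih h; omega

def chop_into_separate_parts_alt (adapters : List Int) : List (List Int) :=
  match h : adapters with
  | [] => [adapters]                 -- no i in range(1, 0): return [adapters] (= [[]])
  | a0 :: rest =>
    match hg : firstGapIdx a0 rest 1 with
    | none => [adapters]
    | some i =>
      PySem.List.slice adapters none (some (i : Int)) ::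
        chop_into_separate_parts_alt (PySem.List.slice adapters (some (i : Int)) none)
termination_by adapters.length
decreasing_by
  have h1 : 1 ≤ i := firstGapIdx_ge hg
  rw [PySem.List.slice_from_natCast, List.length_drop]
  subst h; simp; omega

-- ===== PRECONDITION & SPEC =====
-- Pre_ excludes only the empty list, on which Python A raises IndexError (adapters[0]).
def Pre_chop_into_separate_parts (adapters : List Int) : Prop := adapters ≠ []
instance (adapters : List Int) : Decidable (Pre_chop_into_separate_parts adapters) := by unfold Pre_chop_into_separate_parts; infer_instance
def pvWitness_chop_into_separate_parts : List Int := [1, 2, 5, 6]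

def Spec_chop_into_separate_parts (adapters : List Int) (out : List (List Int)) : Prop := out = chop_into_separate_parts_alt adapters
instance (adapters : List Int) (out : List (List Int)) : Decidable (Spec_chop_into_separate_parts adapters out) := by unfold Spec_chop_into_separate_parts; infer_instance

-- ===== CLAIM =====
def Claim_equal_chop_into_separate_parts : Prop := ∀ (adapters : List Int), Dom_chop_into_separate_parts adapters → Pre_chop_into_separate_parts adapters → Spec_chop_into_separate_parts adapters (chop_into_separate_parts adapters)

-- ===== LEMMAS AND PROOFS =====

theorem chopLoopA_append (xs : List Int) (parts : List (List Int)) (prev : Int) (cur : List Int) :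
    chopLoopA xs parts prev cur = parts ++ chopLoopA xs [] prev cur := by
  induction xs generalizing parts prev cur with
  | nil => simp [chopLoopA]
  | cons a t ih =>
    simp only [chopLoopA]
    split
    · rw [ih (parts ++ [cur]) a [a], ih ([] ++ [cur]) a [a]]; simp
    · exact ih parts a (cur ++ [a])

-- scanning past a gap-free chunk shifts the start index by its length
theorem firstGapIdx_skip (ctail : List Int) (c0 : Int) (ys : List Int) (k : Nat)
    (hch : List.IsChain (fun x y => y - x ≠ 3) (c0 :: ctail)) :
    firstGapIdx c0 (ctail ++ ys) k
      = firstGapIdx ((c0 :: ctail).getLast (by simp)) ys (k + ctail.length) := by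
  induction ctail generalizing c0 k with
  | nil => simp
  | cons b t ih =>
    have hbc : b - c0 ≠ 3 := (List.isChain_cons_cons.mp hch).1
    have hch' : List.IsChain (fun x y => y - x ≠ 3) (b :: t) := (List.isChain_cons_cons.mp hch).2
    simp only [List.cons_append, firstGapIdx, if_neg hbc]
    rw [ih b (k + 1) hch']
    simp [List.getLast_cons]
    ring_nf

theorem chop_alt_unfold (a0 : Int) (rest : List Int) :
    chop_into_separate_parts_alt (a0 :: rest)
      = match firstGapIdx a0 rest 1 with
        | none => [a0 :: rest]
        | some i =>
          PySem.List.slice (a0 :: rest) none (some (i : Int)) ::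
            chop_into_separate_parts_alt (PySem.List.slice (a0 :: rest) (some (i : Int)) none) := by
  rw [chop_into_separate_parts_alt]
  cases hfi : firstGapIdx a0 rest 1 <;> simp

-- main bridge: A's loop with a gap-free nonempty current part cur (ending in prev) computes B on cur ++ xs
theorem loop_eq_alt (xs : List Int) (c0 : Int) (ctail : List Int)
    (hch : List.IsChain (fun x y => y - x ≠ 3) (c0 :: ctail)) :
    chopLoopA xs [] ((c0 :: ctail).getLast (by simp)) (c0 :: ctail)
      = chop_into_separate_parts_alt ((c0 :: ctail) ++ xs) := by
  induction xs generalizing c0 ctail with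
  | nil =>
    simp only [chopLoopA, List.append_nil]
    rw [chop_alt_unfold]
    have : firstGapIdx c0 (ctail ++ ([] : List Int)) 1
        = firstGapIdx ((c0 :: ctail).getLast (by simp)) [] (1 + ctail.length) :=
      firstGapIdx_skip ctail c0 [] 1 hch
    simp only [List.append_nil] at this
    simp [this, firstGapIdx]
  | cons a t ih =>
    simp only [chopLoopA]
    by_cases hg : a - (c0 :: ctail).getLast (by simp) = 3
    · rw [if_pos hg, chopLoopA_append]
      have hskip := firstGapIdx_skip ctail c0 (a :: t) 1 hch
      simp only [firstGapIdx, if_pos hg] at hskip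
      have hlen : (1 + ctail.length : Nat) = (c0 :: ctail).length := by simp; omega
      rw [hlen] at hskip
      rw [List.cons_append, chop_alt_unfold c0 (ctail ++ a :: t), hskip]
      have hrec := ih a [] (List.isChain_singleton a)
      simp only [List.getLast_singleton, List.singleton_append] at hrec
      have h1 : PySem.List.slice (c0 :: (ctail ++ a :: t)) none (some ((c0 :: ctail).length : Int))
          = c0 :: ctail := by
        rw [PySem.List.slice_to_natCast, ← List.cons_append, List.take_left]
      have h2 : PySem.List.slice (c0 :: (ctail ++ a :: t)) (some ((c0 :: ctail).length : Int)) none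
          = a :: t := by
        rw [PySem.List.slice_from_natCast, ← List.cons_append, List.drop_left]
      simp only [h1, h2, hrec, List.nil_append, List.cons_append]
    · rw [if_neg hg]
      have hch' : List.IsChain (fun x y => y - x ≠ 3) (c0 :: (ctail ++ [a])) := by
        rw [← List.cons_append]
        apply List.IsChain.append hch (List.isChain_singleton a)
        intro x hx y hy
        simp only [List.head?_cons, Option.mem_def, Option.some.injEq] at hy
        rw [List.getLast?_eq_some_getLast (l := c0 :: ctail) (by simp), Option.mem_def,
          Option.some.injEq] at hx
        subst hy; subst hx; exact hg
      have hrec := ih c0 (ctail ++ [a]) hch'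
      have hlast : ((c0 :: (ctail ++ [a])).getLast (by simp)) = a := by
        simp
      rw [hlast] at hrec
      simpa using hrec

-- ===== VERDICT =====
theorem chop_into_separate_parts_spec : Claim_equal_chop_into_separate_parts := by
  intro adapters _ hpre
  unfold Spec_chop_into_separate_parts
  match adapters with
  | [] => exact absurd rfl hpre
  | a0 :: rest =>
    show chopLoopA (a0 :: rest) [] a0 [] = _
    simp only [chopLoopA, sub_self]
    rw [if_neg (by norm_num)]
    have := loop_eq_alt rest a0 [] (List.isChain_singleton a0)
    simpa using this
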